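-- pv_equiv track=rewrite | github.com/bdaene/ilemaths | chaine-de-caracteres-et-algo-885748.py | replace_letters_3
-- ===== SOURCE A (Python) =====
-- from itertools import chain, groupby
-- from string import ascii_uppercase, digits
--
-- def replace_letters_3(message):
--     modified_message = []
--     current_digits = []
--     count = 0
--     for c in message:
--         if c in digits:
--             if count:
--                 modified_message.append(map(str, range(1, count + 1)))
--                 count = 0
--             current_digits.append(c)
--         else:
--             if current_digits:
--                 modified_message.append(current_digits)
--                 current_digits = []
--             count += 1
--
--     if current_digits:
--         modified_message.append(current_digits)
--     if count:
--         modified_message.append(map(str, range(1, count + 1)))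
--
--     return ''.join(chain.from_iterable(modified_message))
-- ===== SOURCE B (Python) =====
-- def replace_letters_3(message):
--     # Span-find-and-rewrite: scan maximal runs; digit runs are copied as-is,
--     # each non-digit run of length k becomes the concatenation of str(1)..str(k).
--     out = []
--     i = 0
--     n = len(message)
--     while i < n:
--         j = i
--         if message[i] in '0123456789':
--             while j < n and message[j] in '0123456789':
--                 j += 1
--             out.append(message[i:j])
--         else:
--             while j < n and message[j] not in '0123456789':
--                 j += 1
--             out.append(''.join(map(str, range(1, j - i + 1))))
--         i = j
--     return ''.join(out)
-- ===== Notes on version B (the rewrite author's own statement) =====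
-- stated objective: alternative
-- what changed: Replaced the per-character state machine (pending count + pending digit buffer flushed at run boundaries) with a span scanner that finds each maximal digit/non-digit run by index and rewrites it in one step.
import Mathlib
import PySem

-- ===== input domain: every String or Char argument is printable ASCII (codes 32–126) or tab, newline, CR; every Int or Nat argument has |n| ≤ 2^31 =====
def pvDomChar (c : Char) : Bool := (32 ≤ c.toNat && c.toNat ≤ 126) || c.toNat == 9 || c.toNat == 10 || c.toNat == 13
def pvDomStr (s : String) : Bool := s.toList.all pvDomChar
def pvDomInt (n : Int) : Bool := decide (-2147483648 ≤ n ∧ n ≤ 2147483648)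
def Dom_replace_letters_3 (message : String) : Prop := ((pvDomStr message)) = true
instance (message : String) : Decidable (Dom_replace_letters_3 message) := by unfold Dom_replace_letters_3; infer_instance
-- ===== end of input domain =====

-- B replaces A's per-character state machine with a maximal-run span scanner (alternative decomposition, same cost).

-- ===== PORT A =====
-- strings are represented as List Char pieces; the final ''.join(chain.from_iterable(...)) is the double flatten
def pvNumChunkA (count : Int) : List (List Char) :=
  (PySem.List.pyRange 1 (count + 1) 1).map PySem.Int.toChars

def pvStepA (st : List (List (List Char)) × List (List Char) × Int) (c : Char) :
    List (List (List Char)) × List (List Char) × Int :=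
  let mm := st.1; let cd := st.2.1; let count := st.2.2
  if PySem.Chars.isdigit c then
    let mm := if count ≠ 0 then mm ++ [pvNumChunkA count] else mm
    (mm, cd ++ [[c]], 0)
  else
    let mm := if cd ≠ [] then mm ++ [cd] else mm
    (mm, [], count + 1)

def pvFinishA (st : List (List (List Char)) × List (List Char) × Int) : List Char :=
  let mm := if st.2.1 ≠ [] then st.1 ++ [st.2.1] else st.1
  let mm := if st.2.2 ≠ 0 then mm ++ [pvNumChunkA st.2.2] else mm
  mm.flatten.flatten

def replace_letters_3 (message : String) : String :=
  String.ofList (pvFinishA (message.toList.foldl pvStepA ([], [], 0)))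

-- ===== PORT B =====
def pvNumbering (n : Nat) : List Char :=
  ((PySem.List.pyRange 1 ((n : Int) + 1) 1).map PySem.Int.toChars).flatten

def pvRuns : List Char → List Char
  | [] => []
  | c :: cs =>
    if PySem.Chars.isdigit c then
      (c :: cs.takeWhile PySem.Chars.isdigit) ++ pvRuns (cs.dropWhile PySem.Chars.isdigit)
    else
      pvNumbering ((cs.takeWhile (fun x => !PySem.Chars.isdigit x)).length + 1) ++
        pvRuns (cs.dropWhile (fun x => !PySem.Chars.isdigit x))
  termination_by cs => cs.length
  decreasing_by
    · exact Nat.lt_succ_of_le (List.length_dropWhile_le _ _)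
    · exact Nat.lt_succ_of_le (List.length_dropWhile_le _ _)

def replace_letters_3_alt (message : String) : String :=
  String.ofList (pvRuns message.toList)

-- ===== PRECONDITION & SPEC =====
def Spec_replace_letters_3 (message : String) (out : String) : Prop := out = replace_letters_3_alt message
instance (message : String) (out : String) : Decidable (Spec_replace_letters_3 message out) := by unfold Spec_replace_letters_3; infer_instance

-- ===== CLAIM (what is proved, stated in full; the proofs are below) =====
def Claim_equal_replace_letters_3 : Prop := ∀ (message : String), Dom_replace_letters_3 message → Spec_replace_letters_3 message (replace_letters_3 message)

-- ===== LEMMAS AND PROOFS =====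

lemma pvRuns_cons_digit (c : Char) (cs : List Char) (h : PySem.Chars.isdigit c = true) :
    pvRuns (c :: cs) = (c :: cs.takeWhile PySem.Chars.isdigit) ++ pvRuns (cs.dropWhile PySem.Chars.isdigit) := by
  rw [pvRuns]; simp [h]

lemma pvRuns_cons_nondigit (c : Char) (cs : List Char) (h : PySem.Chars.isdigit c = false) :
    pvRuns (c :: cs) = pvNumbering ((cs.takeWhile (fun x => !PySem.Chars.isdigit x)).length + 1) ++
      pvRuns (cs.dropWhile (fun x => !PySem.Chars.isdigit x)) := by
  rw [pvRuns]; simp [h]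

-- digit runs are copied verbatim, so pvRuns can be split off a digit prefix
lemma pvRuns_digit_split (cs : List Char) :
    pvRuns cs = cs.takeWhile PySem.Chars.isdigit ++ pvRuns (cs.dropWhile PySem.Chars.isdigit) := by
  cases cs with
  | nil => simp [pvRuns]
  | cons c cs =>
    by_cases h : PySem.Chars.isdigit c
    · rw [pvRuns]; simp [h]
    · rw [List.takeWhile_cons, List.dropWhile_cons]; simp [h]

lemma pvNumChunkA_flatten (k : Nat) :
    (pvNumChunkA ((k : Int) + 1)).flatten = pvNumbering (k + 1) := by
  simp [pvNumChunkA, pvNumbering]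

lemma pvMain (cs : List Char) :
    (∀ mm cd, pvFinishA (cs.foldl pvStepA (mm, cd, 0)) =
        mm.flatten.flatten ++ cd.flatten ++ pvRuns cs)
    ∧ (∀ mm (k : Nat), pvFinishA (cs.foldl pvStepA (mm, [], (k : Int) + 1)) =
        mm.flatten.flatten ++
          pvNumbering (k + 1 + (cs.takeWhile (fun x => !PySem.Chars.isdigit x)).length) ++
          pvRuns (cs.dropWhile (fun x => !PySem.Chars.isdigit x))) := by
  induction cs with
  | nil =>
    constructor
    · intro mm cd
      by_cases h : cd = [] <;> simp [pvFinishA, pvRuns, h]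
    · intro mm k
      have : ((k : Int) + 1) ≠ 0 := by omega
      simp [pvFinishA, pvRuns, this, pvNumChunkA_flatten]
  | cons c cs ih =>
    constructor
    · intro mm cd
      by_cases h : PySem.Chars.isdigit c
      · rw [List.foldl_cons]
        have hs : pvStepA (mm, cd, 0) c = (mm, cd ++ [[c]], 0) := by
          simp [pvStepA, h]
        rw [hs, ih.1, pvRuns_cons_digit c cs h]
        simp [pvRuns_digit_split cs]
      · rw [List.foldl_cons]
        have hs : pvStepA (mm, cd, 0) c = ((if cd ≠ [] then mm ++ [cd] else mm), [], 1) := by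
          simp [pvStepA, h]
        rw [hs]
        have h2 := ih.2 (if cd ≠ [] then mm ++ [cd] else mm) 0
        simp only [Nat.cast_zero, zero_add] at h2
        rw [h2, pvRuns_cons_nondigit c cs (by simpa using h)]
        by_cases hcd : cd = [] <;>
          simp [hcd, Nat.add_comm]
    · intro mm k
      by_cases h : PySem.Chars.isdigit c
      · rw [List.foldl_cons]
        have hne : ((k : Int) + 1) ≠ 0 := by omega
        have hs : pvStepA (mm, [], (k : Int) + 1) c
            = (mm ++ [pvNumChunkA ((k : Int) + 1)], [[c]], 0) := by
          simp [pvStepA, h, hne]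
        rw [hs, ih.1]
        simp only [List.takeWhile_cons, List.dropWhile_cons, h, Bool.not_true, if_neg,
          Bool.false_eq_true, not_false_eq_true, List.length_nil, Nat.add_zero]
        rw [pvRuns_cons_digit c cs h]
        simp [pvNumChunkA_flatten, pvRuns_digit_split cs]
      · rw [List.foldl_cons]
        have hs : pvStepA (mm, [], (k : Int) + 1) c = (mm, [], (k : Int) + 1 + 1) := by
          simp [pvStepA, h]
        rw [hs]
        have : (k : Int) + 1 + 1 = ((k + 1 : Nat) : Int) + 1 := by push_cast; ring
        rw [this, (ih.2 mm (k + 1))]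
        have harg : k + 1 + 1 + (cs.takeWhile (fun x => !PySem.Chars.isdigit x)).length
            = k + 1 + ((cs.takeWhile (fun x => !PySem.Chars.isdigit x)).length + 1) := by omega
        simp [h, harg]

-- ===== VERDICT (by name: the statement is the Claim_ definition above) =====
theorem replace_letters_3_spec : Claim_equal_replace_letters_3 := by
  intro message _
  unfold Spec_replace_letters_3 replace_letters_3 replace_letters_3_alt
  rw [(pvMain message.toList).1 [] []]
  simp
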